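-- pv_equiv track=rewrite | github.com/narayan-sajeev/Contacts | contacts.py | find_and_append_contacts
-- ===== SOURCE A (Python) =====
-- def find_and_append_contacts(saved_lst, xl_lst):
--     """Find and append contacts based on name or phone number."""
--     contacts = []
--     saved_names = {contact[0] for contact in saved_lst}
--     saved_phones = {contact[1] for contact in saved_lst}
--
--     for row in xl_lst:
--         if row[0] in saved_names:
--             contact = next((contact for contact in saved_lst if contact[0] == row[0]), None)
--         elif row[1] in saved_phones:
--             contact = next((contact for contact in saved_lst if contact[1] == row[1]), None)
--         else:
--             contact = None
--
--         if contact: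
--             contacts.append(contact)
--             saved_lst.remove(contact)
--         else:
--             contacts.append(row)
--
--     contacts.extend(saved_lst)  # Append remaining saved contacts
--     return contacts
-- ===== SOURCE B (Python) =====
-- from collections import deque, defaultdict
--
-- def find_and_append_contacts(saved_lst, xl_lst):
--     """Find and append contacts based on name or phone number.
--
--     One-pass version: index saved contacts by name and by phone in
--     order-preserving deques of indices, with a tombstone set for
--     contacts already consumed (by either key)."""
--     saved_names = {c[0] for c in saved_lst}
--     saved_phones = {c[1] for c in saved_lst}
--     by_name = defaultdict(deque)
--     by_phone = defaultdict(deque)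
--     for i, c in enumerate(saved_lst):
--         by_name[c[0]].append(i)
--         by_phone[c[1]].append(i)
--     dead = set()
--
--     def pop_alive(q):
--         while q:
--             i = q.popleft()
--             if i not in dead:
--                 return i
--         return None
--
--     contacts = []
--     for row in xl_lst:
--         i = None
--         if row[0] in saved_names:
--             i = pop_alive(by_name[row[0]])
--         elif row[1] in saved_phones:
--             i = pop_alive(by_phone[row[1]])
--         if i is None:
--             contacts.append(row)
--         else:
--             dead.add(i)
--             contacts.append(saved_lst[i])
--     contacts.extend(c for i, c in enumerate(saved_lst) if i not in dead)
--     return contacts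
-- ===== Notes on version B (the rewrite author's own statement) =====
-- stated objective: alternative
-- what changed: A rescans the remaining saved_lst per xl row (next(...) generator scan) and removes matches in place; B builds order-preserving per-name and per-phone index deques once and pops the first live index per row, using a tombstone set instead of list scanning and removal.
import Mathlib
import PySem

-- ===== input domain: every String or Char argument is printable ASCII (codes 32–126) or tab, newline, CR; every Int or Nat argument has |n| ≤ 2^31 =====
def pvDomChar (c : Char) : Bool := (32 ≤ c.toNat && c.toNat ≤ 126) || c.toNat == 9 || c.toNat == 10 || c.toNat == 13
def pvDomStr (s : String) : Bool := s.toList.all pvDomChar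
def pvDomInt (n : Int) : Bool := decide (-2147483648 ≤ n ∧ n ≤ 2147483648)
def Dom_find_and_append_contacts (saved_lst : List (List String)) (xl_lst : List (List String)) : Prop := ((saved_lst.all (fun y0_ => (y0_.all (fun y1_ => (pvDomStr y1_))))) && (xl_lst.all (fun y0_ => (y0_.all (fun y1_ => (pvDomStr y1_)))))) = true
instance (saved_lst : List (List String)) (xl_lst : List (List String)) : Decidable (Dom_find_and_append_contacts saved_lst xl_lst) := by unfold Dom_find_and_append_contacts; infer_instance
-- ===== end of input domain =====

-- B replaces A's per-row scan of (and physical removal from) saved_lst by index deques keyed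
-- on name/phone with a tombstone set (a different, single-pass matching algorithm; objective: alternative).
-- NOTE: Python A mutates saved_lst in place (list.remove); the equivalence proved here is about the RETURN value only.

-- ===== PORT A =====
-- the body of A's 'for row in xl_lst' loop, as a named step function; state = (contacts, saved_lst)
def pvStepA (saved_names saved_phones : PySem.Set String)
    (st : List (List String) × List (List String)) (row : List String) :
    List (List String) × List (List String) :=
  let contact : Option (List String) :=
    if PySem.Set.contains saved_names (PySem.List.pyGetD row 0 "") then
      st.2.find? (fun contact => PySem.List.pyGetD contact 0 "" == PySem.List.pyGetD row 0 "")
    else if PySem.Set.contains saved_phones (PySem.List.pyGetD row 1 "") then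
      st.2.find? (fun contact => PySem.List.pyGetD contact 1 "" == PySem.List.pyGetD row 1 "")
    else none
  match contact with
  | some c =>
    if c.isEmpty then (st.1 ++ [row], st.2)   -- Python's `if contact:` is false on the empty list
    else (st.1 ++ [c], (PySem.List.remove? st.2 c).getD st.2)
  | none => (st.1 ++ [row], st.2)

def find_and_append_contacts (saved_lst : List (List String)) (xl_lst : List (List String)) : List (List String) :=
  let saved_names : PySem.Set String := PySem.Set.ofList (saved_lst.map (fun contact => PySem.List.pyGetD contact 0 ""))
  let saved_phones : PySem.Set String := PySem.Set.ofList (saved_lst.map (fun contact => PySem.List.pyGetD contact 1 ""))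
  let st := xl_lst.foldl (pvStepA saved_names saved_phones) ([], saved_lst)
  st.1 ++ st.2

-- ===== PORT B =====
-- Source B's pop_alive: pop from the front of the deque until a non-tombstoned index appears
def pvPopAlive (dead : PySem.Set Int) : List Int → Option Int × List Int
  | [] => (none, [])
  | i :: q => if PySem.Set.contains dead i then pvPopAlive dead q else (some i, q)

-- the body of Source B's 'for row in xl_lst' loop; state = (contacts, by_name, by_phone, dead)
def pvStepB (saved_lst : List (List String)) (saved_names saved_phones : PySem.Set String)
    (st : List (List String) × PySem.Dict String (List Int) × PySem.Dict String (List Int) × PySem.Set Int)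
    (row : List String) :
    List (List String) × PySem.Dict String (List Int) × PySem.Dict String (List Int) × PySem.Set Int :=
  let (contacts, bn, bp, dead) := st
  if PySem.Set.contains saved_names (PySem.List.pyGetD row 0 "") then
    let r := pvPopAlive dead (bn.getD (PySem.List.pyGetD row 0 "") [])
    let bn' := bn.insert (PySem.List.pyGetD row 0 "") r.2
    match r.1 with
    | some i => (contacts ++ [PySem.List.pyGetD saved_lst i []], bn', bp, PySem.Set.add dead i)
    | none => (contacts ++ [row], bn', bp, dead)
  else if PySem.Set.contains saved_phones (PySem.List.pyGetD row 1 "") then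
    let r := pvPopAlive dead (bp.getD (PySem.List.pyGetD row 1 "") [])
    let bp' := bp.insert (PySem.List.pyGetD row 1 "") r.2
    match r.1 with
    | some i => (contacts ++ [PySem.List.pyGetD saved_lst i []], bn, bp', PySem.Set.add dead i)
    | none => (contacts ++ [row], bn, bp', dead)
  else (contacts ++ [row], bn, bp, dead)

def find_and_append_contacts_alt (saved_lst : List (List String)) (xl_lst : List (List String)) : List (List String) :=
  let saved_names : PySem.Set String := PySem.Set.ofList (saved_lst.map (fun c => PySem.List.pyGetD c 0 ""))
  let saved_phones : PySem.Set String := PySem.Set.ofList (saved_lst.map (fun c => PySem.List.pyGetD c 1 ""))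
  let enum := PySem.List.enumerate saved_lst 0
  let by_name : PySem.Dict String (List Int) :=
    enum.foldl (fun d p => d.modify (PySem.List.pyGetD p.2 0 "") [] (fun l => l ++ [p.1])) PySem.Dict.empty
  let by_phone : PySem.Dict String (List Int) :=
    enum.foldl (fun d p => d.modify (PySem.List.pyGetD p.2 1 "") [] (fun l => l ++ [p.1])) PySem.Dict.empty
  let st := xl_lst.foldl (pvStepB saved_lst saved_names saved_phones) ([], by_name, by_phone, PySem.Set.empty)
  st.1 ++ (enum.filter (fun p => !(PySem.Set.contains st.2.2.2 p.1))).map (fun p => p.2)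

-- ===== PRECONDITION & SPEC =====
-- Pre_ excludes exactly the inputs where Python A raises IndexError: a saved contact with fewer
-- than 2 fields (contact[1] in the set comprehensions), or an xl row that is empty (row[0]) or has
-- a single field whose name is not among the saved names (so `row[1]` is evaluated).
def Pre_find_and_append_contacts (saved_lst : List (List String)) (xl_lst : List (List String)) : Prop :=
  (∀ c ∈ saved_lst, 2 ≤ c.length) ∧
  (∀ r ∈ xl_lst, 1 ≤ r.length ∧
    (2 ≤ r.length ∨ PySem.List.pyGetD r 0 "" ∈ saved_lst.map (fun c => PySem.List.pyGetD c 0 "")))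
instance (saved_lst : List (List String)) (xl_lst : List (List String)) : Decidable (Pre_find_and_append_contacts saved_lst xl_lst) := by unfold Pre_find_and_append_contacts; infer_instance

def pvWitness_find_and_append_contacts : List (List String) × List (List String) :=
  ([["ann", "111"], ["bob", "222"]], [["ann", "999"], ["zoe", "222"], ["new", "333"]])

def Spec_find_and_append_contacts (saved_lst : List (List String)) (xl_lst : List (List String)) (out : List (List String)) : Prop := out = find_and_append_contacts_alt saved_lst xl_lst
instance (saved_lst : List (List String)) (xl_lst : List (List String)) (out : List (List String)) : Decidable (Spec_find_and_append_contacts saved_lst xl_lst out) := by unfold Spec_find_and_append_contacts; infer_instance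

-- ===== CLAIM (what is proved, stated in full; the proofs are below) =====
def Claim_equal_find_and_append_contacts : Prop := ∀ (saved_lst : List (List String)) (xl_lst : List (List String)), Dom_find_and_append_contacts saved_lst xl_lst → Pre_find_and_append_contacts saved_lst xl_lst → Spec_find_and_append_contacts saved_lst xl_lst (find_and_append_contacts saved_lst xl_lst)

-- ===== LEMMAS AND PROOFS =====

-- the contacts of saved_lst whose index is not tombstoned, in order
def pvAliveL (sl : List (List String)) (dead : PySem.Set Int) : List (List String) :=
  ((PySem.List.enumerate sl 0).filter (fun p => !(PySem.Set.contains dead p.1))).map (fun p => p.2)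

-- the (ordered) indices of saved contacts whose `key`-field equals s
def pvIdx (sl : List (List String)) (key : List String → String) (s : String) : List Int :=
  ((PySem.List.enumerate sl 0).filter (fun p => key p.2 == s)).map (fun p => p.1)

-- a deque q is a suffix of the full index list L whose dropped prefix is entirely tombstoned
def pvQinv (L q : List Int) (dead : PySem.Set Int) : Prop :=
  ∃ k, q = L.drop k ∧ ∀ j ∈ L.take k, j ∈ dead

-- the simulation invariant between A's state (saved) and B's state (bn, bp, dead)
def pvInv (sl : List (List String)) (saved : List (List String))
    (bn bp : PySem.Dict String (List Int)) (dead : PySem.Set Int) : Prop :=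
  saved = pvAliveL sl dead ∧
  (∀ s, pvQinv (pvIdx sl (fun c => PySem.List.pyGetD c 0 "") s) (bn.getD s []) dead) ∧
  (∀ s, pvQinv (pvIdx sl (fun c => PySem.List.pyGetD c 1 "") s) (bp.getD s []) dead)


lemma pv_popAlive_spec (dead : PySem.Set Int) (L : List Int) (k : Nat)
    (hk : ∀ j ∈ L.take k, j ∈ dead) :
    (pvPopAlive dead (L.drop k) = (none, []) ∧ L.find? (fun i => !(PySem.Set.contains dead i)) = none) ∨
    (∃ i q', pvPopAlive dead (L.drop k) = (some i, q') ∧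
      L.find? (fun i => !(PySem.Set.contains dead i)) = some i ∧
      ∃ k', q' = L.drop k' ∧ ∀ j ∈ L.take k', j ∈ PySem.Set.add dead i) := by
  induction L generalizing k with
  | nil => left; simp [pvPopAlive]
  | cons x t ih =>
    cases k with
    | zero =>
      simp only [List.drop_zero]
      by_cases hx : x ∈ dead
      · rcases ih 0 (by simp) with ⟨h1, h2⟩ | ⟨i, q', h1, h2, k', hq, hk'⟩
        · left
          refine ⟨by simpa [pvPopAlive, hx] using h1, by simpa [List.find?_cons, hx] using h2⟩
        · right
          refine ⟨i, q', by simpa [pvPopAlive, hx] using h1,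
            by simpa [List.find?_cons, hx] using h2, k' + 1, by simpa using hq, ?_⟩
          intro j hj
          simp only [List.take_succ_cons, List.mem_cons] at hj
          rcases hj with rfl | hj
          · simp [PySem.Set.mem_add, hx]
          · exact hk' j hj
      · right
        refine ⟨x, t, by simp [pvPopAlive, hx], by simp [hx], 1, by simp, ?_⟩
        intro j hj
        simp only [List.take_succ_cons, List.take_zero, List.mem_cons, List.not_mem_nil, or_false] at hj
        subst hj
        simp [PySem.Set.mem_add]
    | succ k =>
      have hx : x ∈ dead := hk x (by simp)
      have hkt : ∀ j ∈ t.take k, j ∈ dead := by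
        intro j hj; exact hk j (by simp [hj])
      simp only [List.drop_succ_cons]
      rcases ih k hkt with ⟨h1, h2⟩ | ⟨i, q', h1, h2, k', hq, hk'⟩
      · left; exact ⟨h1, by simpa [List.find?_cons, hx] using h2⟩
      · right
        refine ⟨i, q', h1, by simpa [List.find?_cons, hx] using h2, k' + 1, by simpa using hq, ?_⟩
        intro j hj
        simp only [List.take_succ_cons, List.mem_cons] at hj
        rcases hj with rfl | hj
        · simp [PySem.Set.mem_add, hx]
        · exact hk' j hj

lemma pv_getD_group (l : List (Int × List String)) (key : List String → String) (s : String) :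
    (l.foldl (fun d p => d.modify (key p.2) [] (fun q => q ++ [p.1])) PySem.Dict.empty).getD s []
      = (l.filter (fun p => key p.2 == s)).map (fun p => p.1) := by
  have h1 : l.foldl (fun d p => d.modify (key p.2) [] (fun q => q ++ [p.1])) PySem.Dict.empty
      = (l.map (fun p => (key p.2, p.1))).foldl (fun d p => d.modify p.1 [] (fun q => q ++ [p.2])) PySem.Dict.empty := by
    rw [List.foldl_map]
  rw [h1, PySem.Dict.getD_foldl_modify_append]
  rw [List.filter_map]
  simp [List.map_map, Function.comp_def]

lemma pv_find?_filter {α : Type} (l : List α) (q p : α → Bool) :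
    (l.filter q).find? p = l.find? (fun x => q x && p x) := by
  induction l with
  | nil => rfl
  | cons x t ih =>
    by_cases hq : q x = true
    · by_cases hp : p x = true
      · simp [hq, hp]
      · simp only [Bool.not_eq_true] at hp
        simp [hq, hp, ih]
    · simp only [Bool.not_eq_true] at hq
      simp [hq, ih]

lemma pv_find?_congr {α : Type} (l : List α) (p q : α → Bool) (h : ∀ x ∈ l, p x = q x) :
    l.find? p = l.find? q := by
  induction l with
  | nil => rfl
  | cons x t ih =>
    have hx := h x (by simp)
    by_cases hp : p x = true
    · simp [hp, hx ▸ hp]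
    · simp only [Bool.not_eq_true] at hp
      simp [hp, hx ▸ hp, ih (fun y hy => h y (by simp [hy]))]

-- A's find? over the alive sublist, expressed as a find? over the enumerated list
lemma pv_find_aliveA (enum : List (Int × List String)) (dead : PySem.Set Int)
    (key : List String → String) (v : String) :
    ((enum.filter (fun p => !(PySem.Set.contains dead p.1))).map (fun p => p.2)).find?
        (fun c => key c == v)
      = (enum.find? (fun p => !(PySem.Set.contains dead p.1) && (key p.2 == v))).map (fun p => p.2) := by
  rw [List.find?_map, pv_find?_filter]
  rfl

-- B's find? over the per-key index list, expressed the same way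
lemma pv_find_aliveB (enum : List (Int × List String)) (dead : PySem.Set Int)
    (key : List String → String) (v : String) :
    ((enum.filter (fun p => key p.2 == v)).map (fun p => p.1)).find?
        (fun i => !(PySem.Set.contains dead i))
      = (enum.find? (fun p => !(PySem.Set.contains dead p.1) && (key p.2 == v))).map (fun p => p.1) := by
  rw [List.find?_map, pv_find?_filter]
  have := pv_find?_congr enum
    (fun p => (key p.2 == v) && !(PySem.Set.contains dead p.1))
    (fun p => !(PySem.Set.contains dead p.1) && (key p.2 == v))
    (fun x _ => Bool.and_comm _ _)
  rw [show (fun x => (key x.2 == v) && ((fun i => !(PySem.Set.contains dead i)) ∘ (fun p : Int × List String => p.1)) x)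
        = (fun p : Int × List String => (key p.2 == v) && !(PySem.Set.contains dead p.1)) from rfl, this]

-- erasing the found contact from the alive sublist = tombstoning its index
lemma pv_erase_alive (enum : List (Int × List String)) (dead : PySem.Set Int)
    (key : List String → String) (v : String) (i : Int) (c : List String)
    (hnd : enum.Pairwise (fun p q => p.1 < q.1))
    (hf : enum.find? (fun p => !(PySem.Set.contains dead p.1) && (key p.2 == v)) = some (i, c)) :
    ((enum.filter (fun p => !(PySem.Set.contains dead p.1))).map (fun p => p.2)).erase c
      = (enum.filter (fun p => !(PySem.Set.contains (PySem.Set.add dead i) p.1))).map (fun p => p.2) := by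
  induction enum with
  | nil => simp at hf
  | cons x t ih =>
    have hnd' := (List.pairwise_cons.mp hnd).2
    have hxlt := (List.pairwise_cons.mp hnd).1
    by_cases hP : (!(PySem.Set.contains dead x.1) && (key x.2 == v)) = true
    · -- x is the found element
      rw [List.find?_cons_of_pos (a := x) (p := fun p => !(PySem.Set.contains dead p.1) && (key p.2 == v)) hP] at hf
      injection hf with hf
      obtain ⟨halive, hkeyx⟩ : x.1 ∉ dead ∧ key x.2 = v := by simpa using hP
      have hx1 : x.1 = i := by rw [hf]
      have hx2 : x.2 = c := by rw [hf]
      rw [List.filter_cons_of_pos (by simpa using halive),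
          List.filter_cons_of_neg (by simp [PySem.Set.mem_add, hx1])]
      simp only [List.map_cons, hx2, List.erase_cons_head]
      congr 1
      apply List.filter_congr
      intro p hp
      have hne : p.1 ≠ i := by
        have := hxlt p hp
        omega
      simp [PySem.Set.mem_add, hne]
    · rw [List.find?_cons_of_neg (a := x) (p := fun p => !(PySem.Set.contains dead p.1) && (key p.2 == v)) (by simpa using hP)] at hf
      have hnotP : ¬(x.1 ∉ dead ∧ key x.2 = v) := by simpa using hP
      have hci : (i, c) ∈ t := List.mem_of_find?_eq_some hf
      have hxi : x.1 ≠ i := by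
        have := hxlt (i, c) hci
        simp at this
        omega
      by_cases hx : x.1 ∈ dead
      · rw [List.filter_cons_of_neg (by simpa using hx),
            List.filter_cons_of_neg (by simp [PySem.Set.mem_add, hx])]
        exact ih hnd' hf
      · have hkey : key x.2 ≠ v := fun h => hnotP ⟨hx, h⟩
        have hc : key c = v := by
          have := List.find?_some hf
          simp at this
          exact this.2
        have hxc : x.2 ≠ c := fun h => hkey (by rw [h, hc])
        rw [List.filter_cons_of_pos (by simpa using hx),
            List.filter_cons_of_pos (by simp [PySem.Set.mem_add, hx, hxi])]
        simp only [List.map_cons]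
        rw [List.erase_cons_tail (by simpa using hxc)]
        rw [ih hnd' hf]


lemma pv_Qinv_mono (L q : List Int) (dead : PySem.Set Int) (i : Int)
    (h : pvQinv L q dead) : pvQinv L q (PySem.Set.add dead i) := by
  obtain ⟨k, hq, hk⟩ := h
  exact ⟨k, hq, fun j hj => by simp [PySem.Set.mem_add, hk j hj]⟩

-- one matching branch (name or phone), fully analysed
lemma pv_branch (sl : List (List String)) (hsl : ∀ c ∈ sl, c ≠ [])
    (key : List String → String) (v : String)
    (savedA : List (List String)) (q : List Int) (dead : PySem.Set Int)
    (hA : savedA = pvAliveL sl dead)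
    (hQ : pvQinv (pvIdx sl key v) q dead) :
    (∃ i, (pvPopAlive dead q).1 = some i ∧
       savedA.find? (fun c => key c == v) = some (PySem.List.pyGetD sl i []) ∧
       PySem.List.pyGetD sl i [] ≠ [] ∧
       PySem.List.pyGetD sl i [] ∈ savedA ∧
       savedA.erase (PySem.List.pyGetD sl i []) = pvAliveL sl (PySem.Set.add dead i) ∧
       pvQinv (pvIdx sl key v) (pvPopAlive dead q).2 (PySem.Set.add dead i))
    ∨ ((pvPopAlive dead q) = (none, []) ∧
       savedA.find? (fun c => key c == v) = none ∧
       pvQinv (pvIdx sl key v) [] dead) := by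
  obtain ⟨k, hq, hk⟩ := hQ
  rcases pv_popAlive_spec dead (pvIdx sl key v) k hk with ⟨h1, h2⟩ | ⟨i, q', h1, h2, k', hq', hk'⟩
  · right
    have h2' := h2
    unfold pvIdx at h2'
    rw [pv_find_aliveB] at h2'
    have hfe : (PySem.List.enumerate sl 0).find?
        (fun p => !(PySem.Set.contains dead p.1) && (key p.2 == v)) = none := by
      cases hfe : (PySem.List.enumerate sl 0).find?
          (fun p => !(PySem.Set.contains dead p.1) && (key p.2 == v)) with
      | none => rfl
      | some p => rw [hfe] at h2'; simp at h2'
    refine ⟨by rw [hq]; exact h1, ?_, ?_⟩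
    · rw [hA]
      unfold pvAliveL
      rw [pv_find_aliveA, hfe]
      rfl
    · refine ⟨(pvIdx sl key v).length, by simp, ?_⟩
      intro j hj
      rw [List.take_length] at hj
      have := List.find?_eq_none.mp h2 j hj
      simpa using this
  · left
    have h2' := h2
    unfold pvIdx at h2'
    rw [pv_find_aliveB] at h2'
    obtain ⟨p, hfe, hp1⟩ := Option.map_eq_some_iff.mp h2'
    obtain ⟨i', c⟩ := p
    simp only at hp1
    subst hp1
    have hmem : (i', c) ∈ PySem.List.enumerate sl 0 := List.mem_of_find?_eq_some hfe
    obtain ⟨kk, hkk, heq⟩ := (PySem.List.mem_enumerate_iff sl 0 (i', c)).mp hmem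
    have hi : i' = (kk : Int) := by
      have := congrArg Prod.fst heq; simpa using this
    have hc : c = sl[kk] := by
      have := congrArg Prod.snd heq; simpa using this
    have hget : PySem.List.pyGetD sl i' [] = c := by
      rw [hi, PySem.List.pyGetD_natCast, hc]
      simp [List.getD_eq_getElem?_getD, List.getElem?_eq_getElem hkk]
    have hfindA : savedA.find? (fun c => key c == v) = some c := by
      rw [hA]
      unfold pvAliveL
      rw [pv_find_aliveA, hfe]
      rfl
    have hcs : c ∈ savedA := List.mem_of_find?_eq_some hfindA
    refine ⟨i', by rw [hq]; exact congrArg Prod.fst h1, by rw [hget]; exact hfindA,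
      by rw [hget]; exact hc ▸ hsl _ (List.getElem_mem hkk), by rw [hget]; exact hcs, ?_, ?_⟩
    · rw [hget, hA]
      unfold pvAliveL
      exact pv_erase_alive _ dead key v i' c (PySem.List.pairwise_lt_enumerate sl 0) hfe
    · rw [hq, h1]
      exact ⟨k', hq', hk'⟩

lemma pv_step_sim (sl : List (List String)) (hsl : ∀ c ∈ sl, c ≠ [])
    (ns ps : PySem.Set String) (acc savedA : List (List String))
    (bn bp : PySem.Dict String (List Int)) (dead : PySem.Set Int) (row : List String)
    (hInv : pvInv sl savedA bn bp dead) :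
    (pvStepA ns ps (acc, savedA) row).1 = (pvStepB sl ns ps (acc, bn, bp, dead) row).1 ∧
    pvInv sl (pvStepA ns ps (acc, savedA) row).2
      (pvStepB sl ns ps (acc, bn, bp, dead) row).2.1
      (pvStepB sl ns ps (acc, bn, bp, dead) row).2.2.1
      (pvStepB sl ns ps (acc, bn, bp, dead) row).2.2.2 := by
  obtain ⟨hA, hQn, hQp⟩ := hInv
  by_cases h0 : PySem.Set.contains ns (PySem.List.pyGetD row 0 "") = true
  all_goals first
  | (have h0' : PySem.List.pyGetD row 0 "" ∈ ns := by simpa using h0)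
  | (have h0' : PySem.List.pyGetD row 0 "" ∉ ns := by simpa using h0)
  · rcases pv_branch sl hsl (fun c => PySem.List.pyGetD c 0 "") (PySem.List.pyGetD row 0 "")
        savedA (bn.getD (PySem.List.pyGetD row 0 "") []) dead hA
        (hQn (PySem.List.pyGetD row 0 "")) with
      ⟨i, hpop, hfind, hne, hmem, herase, hQ'⟩ | ⟨hpop, hfind, hQ'⟩
    · try simp only at hfind
      have hAred : pvStepA ns ps (acc, savedA) row
          = (acc ++ [PySem.List.pyGetD sl i []], savedA.erase (PySem.List.pyGetD sl i [])) := by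
        simp [pvStepA, h0', hfind]
        rw [PySem.List.remove?_eq_some_erase savedA _ hmem]
        simp [hne]
      have hBred : pvStepB sl ns ps (acc, bn, bp, dead) row
          = (acc ++ [PySem.List.pyGetD sl i []],
             bn.insert (PySem.List.pyGetD row 0 "")
               (pvPopAlive dead (bn.getD (PySem.List.pyGetD row 0 "") [])).2,
             bp, PySem.Set.add dead i) := by
        simp [pvStepB, h0', hpop]
      rw [hAred, hBred]
      refine ⟨rfl, herase, ?_, fun s => pv_Qinv_mono _ _ _ _ (hQp s)⟩
      intro s
      by_cases hs : s = PySem.List.pyGetD row 0 ""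
      · subst hs
        rw [PySem.Dict.getD_insert_self]
        exact hQ'
      · rw [PySem.Dict.getD_insert_of_ne _ _ _ hs]
        exact pv_Qinv_mono _ _ _ _ (hQn s)
    · try simp only at hfind
      have hAred : pvStepA ns ps (acc, savedA) row = (acc ++ [row], savedA) := by
        simp [pvStepA, h0', hfind]
      have hBred : pvStepB sl ns ps (acc, bn, bp, dead) row
          = (acc ++ [row], bn.insert (PySem.List.pyGetD row 0 "") [], bp, dead) := by
        simp [pvStepB, h0', hpop]
      rw [hAred, hBred]
      refine ⟨rfl, hA, ?_, hQp⟩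
      intro s
      by_cases hs : s = PySem.List.pyGetD row 0 ""
      · subst hs
        rw [PySem.Dict.getD_insert_self]
        exact hQ'
      · rw [PySem.Dict.getD_insert_of_ne _ _ _ hs]
        exact hQn s
  · by_cases h1 : PySem.Set.contains ps (PySem.List.pyGetD row 1 "") = true
    all_goals first
    | (have h1' : PySem.List.pyGetD row 1 "" ∈ ps := by simpa using h1)
    | (have h1' : PySem.List.pyGetD row 1 "" ∉ ps := by simpa using h1)
    · rcases pv_branch sl hsl (fun c => PySem.List.pyGetD c 1 "") (PySem.List.pyGetD row 1 "")
          savedA (bp.getD (PySem.List.pyGetD row 1 "") []) dead hA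
          (hQp (PySem.List.pyGetD row 1 "")) with
        ⟨i, hpop, hfind, hne, hmem, herase, hQ'⟩ | ⟨hpop, hfind, hQ'⟩
      · try simp only at hfind
        have hAred : pvStepA ns ps (acc, savedA) row
            = (acc ++ [PySem.List.pyGetD sl i []], savedA.erase (PySem.List.pyGetD sl i [])) := by
          simp [pvStepA, h0', h1', hfind]
          rw [PySem.List.remove?_eq_some_erase savedA _ hmem]
          simp [hne]
        have hBred : pvStepB sl ns ps (acc, bn, bp, dead) row
            = (acc ++ [PySem.List.pyGetD sl i []], bn,
               bp.insert (PySem.List.pyGetD row 1 "")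
                 (pvPopAlive dead (bp.getD (PySem.List.pyGetD row 1 "") [])).2,
               PySem.Set.add dead i) := by
          simp [pvStepB, h0', h1', hpop]
        rw [hAred, hBred]
        refine ⟨rfl, herase, fun s => pv_Qinv_mono _ _ _ _ (hQn s), ?_⟩
        intro s
        by_cases hs : s = PySem.List.pyGetD row 1 ""
        · subst hs
          rw [PySem.Dict.getD_insert_self]
          exact hQ'
        · rw [PySem.Dict.getD_insert_of_ne _ _ _ hs]
          exact pv_Qinv_mono _ _ _ _ (hQp s)
      · try simp only at hfind
        have hAred : pvStepA ns ps (acc, savedA) row = (acc ++ [row], savedA) := by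
          simp [pvStepA, h0', h1', hfind]
        have hBred : pvStepB sl ns ps (acc, bn, bp, dead) row
            = (acc ++ [row], bn, bp.insert (PySem.List.pyGetD row 1 "") [], dead) := by
          simp [pvStepB, h0', h1', hpop]
        rw [hAred, hBred]
        refine ⟨rfl, hA, hQn, ?_⟩
        intro s
        by_cases hs : s = PySem.List.pyGetD row 1 ""
        · subst hs
          rw [PySem.Dict.getD_insert_self]
          exact hQ'
        · rw [PySem.Dict.getD_insert_of_ne _ _ _ hs]
          exact hQp s
    · have hAred : pvStepA ns ps (acc, savedA) row = (acc ++ [row], savedA) := by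
        simp [pvStepA, h0', h1']
      have hBred : pvStepB sl ns ps (acc, bn, bp, dead) row = (acc ++ [row], bn, bp, dead) := by
        simp [pvStepB, h0', h1']
      rw [hAred, hBred]
      exact ⟨rfl, hA, hQn, hQp⟩

lemma pv_loop (sl : List (List String)) (hsl : ∀ c ∈ sl, c ≠ [])
    (ns ps : PySem.Set String) :
    ∀ (xl : List (List String)) (acc savedA : List (List String))
      (bn bp : PySem.Dict String (List Int)) (dead : PySem.Set Int),
      pvInv sl savedA bn bp dead →
      (xl.foldl (pvStepA ns ps) (acc, savedA)).1 ++ (xl.foldl (pvStepA ns ps) (acc, savedA)).2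
        = (xl.foldl (pvStepB sl ns ps) (acc, bn, bp, dead)).1
          ++ pvAliveL sl (xl.foldl (pvStepB sl ns ps) (acc, bn, bp, dead)).2.2.2 := by
  intro xl
  induction xl with
  | nil =>
    intro acc savedA bn bp dead hInv
    simpa using congrArg (acc ++ ·) hInv.1
  | cons r xs ih =>
    intro acc savedA bn bp dead hInv
    obtain ⟨h1, h2⟩ := pv_step_sim sl hsl ns ps acc savedA bn bp dead r hInv
    simp only [List.foldl_cons]
    have hBe : pvStepB sl ns ps (acc, bn, bp, dead) r
        = ((pvStepB sl ns ps (acc, bn, bp, dead) r).1,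
           (pvStepB sl ns ps (acc, bn, bp, dead) r).2.1,
           (pvStepB sl ns ps (acc, bn, bp, dead) r).2.2.1,
           (pvStepB sl ns ps (acc, bn, bp, dead) r).2.2.2) := rfl
    have hAe : pvStepA ns ps (acc, savedA) r
        = ((pvStepA ns ps (acc, savedA) r).1, (pvStepA ns ps (acc, savedA) r).2) := rfl
    rw [hAe, hBe, h1]
    exact ih _ _ _ _ _ h2

-- ===== VERDICT (by name: the statement is the Claim_ definition above) =====
theorem find_and_append_contacts_spec : Claim_equal_find_and_append_contacts := by
  intro sl xl hDom hPre
  unfold Spec_find_and_append_contacts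
  obtain ⟨hsl2, _⟩ := hPre
  have hsl : ∀ c ∈ sl, c ≠ [] := by
    intro c hc h
    have := hsl2 c hc
    subst h
    simp at this
  have ha : sl = pvAliveL sl PySem.Set.empty := by
    simp [pvAliveL, PySem.Set.empty, PySem.List.map_snd_enumerate]
  have hQn0 : ∀ s, pvQinv (pvIdx sl (fun c => PySem.List.pyGetD c 0 "") s)
      ((List.foldl (fun d p => d.modify (PySem.List.pyGetD p.2 0 "") [] (fun l => l ++ [p.1]))
        PySem.Dict.empty (PySem.List.enumerate sl 0)).getD s []) PySem.Set.empty := by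
    intro s
    refine ⟨0, ?_, by simp⟩
    rw [List.drop_zero]
    exact pv_getD_group (PySem.List.enumerate sl 0) (fun c => PySem.List.pyGetD c 0 "") s
  have hQp0 : ∀ s, pvQinv (pvIdx sl (fun c => PySem.List.pyGetD c 1 "") s)
      ((List.foldl (fun d p => d.modify (PySem.List.pyGetD p.2 1 "") [] (fun l => l ++ [p.1]))
        PySem.Dict.empty (PySem.List.enumerate sl 0)).getD s []) PySem.Set.empty := by
    intro s
    refine ⟨0, ?_, by simp⟩
    rw [List.drop_zero]
    exact pv_getD_group (PySem.List.enumerate sl 0) (fun c => PySem.List.pyGetD c 1 "") s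
  exact pv_loop sl hsl
    (PySem.Set.ofList (sl.map (fun contact => PySem.List.pyGetD contact 0 "")))
    (PySem.Set.ofList (sl.map (fun contact => PySem.List.pyGetD contact 1 "")))
    xl [] sl _ _ PySem.Set.empty ⟨ha, hQn0, hQp0⟩
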